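-- pv_equiv track=rewrite | github.com/deepankar1023/Team-Predictor-IPL | backend/app.py | extract_year_from_match_id
-- ===== SOURCE A (Python) =====
-- def extract_year_from_match_id(match_id):
--     """
--     Extract year from match ID based on the number of matches per year
--     """
--     matches_per_year = {
--         2008: 50, 2009: 57, 2010: 60, 2011: 74, 2012: 76, 2013: 76,
--         2014: 60, 2015: 59, 2016: 60, 2017: 60, 2018: 60, 2019: 60,
--         2020: 60, 2021: 70, 2022: 74, 2023: 74
--     }
--
--     cumulative_matches = 0
--     for year, matches in matches_per_year.items():
--         cumulative_matches += matches
--         if match_id <= cumulative_matches: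
--             return year
--     return 2023
-- ===== SOURCE B (Python) =====
-- _YEARS = [2008, 2009, 2010, 2011, 2012, 2013, 2014, 2015,
--           2016, 2017, 2018, 2019, 2020, 2021, 2022, 2023]
-- _COUNTS = [50, 57, 60, 74, 76, 76, 60, 59, 60, 60, 60, 60, 60, 70, 74, 74]
-- _CUM = []
-- _t = 0
-- for _c in _COUNTS:
--     _t += _c
--     _CUM.append(_t)
--
--
-- def _bisect_left(a, x):
--     lo, hi = 0, len(a)
--     while lo < hi:
--         mid = (lo + hi) // 2
--         if a[mid] < x:
--             lo = mid + 1
--         else: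
--             hi = mid
--     return lo
--
--
-- def extract_year_from_match_id(match_id):
--     """
--     Extract year from match ID based on the number of matches per year
--     (prefix-sum table + binary search).
--     """
--     i = _bisect_left(_CUM, match_id)
--     return _YEARS[i] if i < len(_YEARS) else 2023
-- ===== Notes on version B (the rewrite author's own statement) =====
-- stated objective: alternative
-- what changed: Replaced the linear accumulating scan over the year/count dict with a precomputed prefix-sum table queried by a hand-written bisect_left binary search.
import Mathlib
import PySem

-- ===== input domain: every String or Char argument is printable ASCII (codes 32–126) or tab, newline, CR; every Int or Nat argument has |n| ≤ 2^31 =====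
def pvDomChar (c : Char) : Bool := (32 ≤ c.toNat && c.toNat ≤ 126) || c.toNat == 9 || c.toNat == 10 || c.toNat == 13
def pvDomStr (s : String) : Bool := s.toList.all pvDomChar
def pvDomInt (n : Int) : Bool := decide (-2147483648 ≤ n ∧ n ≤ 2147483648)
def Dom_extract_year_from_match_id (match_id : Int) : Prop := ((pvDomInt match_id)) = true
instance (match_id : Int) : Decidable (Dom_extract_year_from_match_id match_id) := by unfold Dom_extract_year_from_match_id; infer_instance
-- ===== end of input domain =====

set_option maxRecDepth 4000
set_option maxHeartbeats 1600000


-- B replaces A's linear cumulative scan with a precomputed prefix-sum table queried by binary search (alternative decomposition; same observable results).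

-- ===== PORT A =====
-- the dict literal, in insertion order (years 2008..2023 with their match counts)
def pvMatchesPerYear : List (Int × Int) :=
  [(2008, 50), (2009, 57), (2010, 60), (2011, 74), (2012, 76), (2013, 76),
   (2014, 60), (2015, 59), (2016, 60), (2017, 60), (2018, 60), (2019, 60),
   (2020, 60), (2021, 70), (2022, 74), (2023, 74)]

-- A's for-loop with running total and early return
def pvALoop (match_id : Int) (cum : Int) : List (Int × Int) → Int
  | [] => 2023
  | (year, m) :: rest =>
    let c := cum + m
    if match_id ≤ c then year else pvALoop match_id c rest

def extract_year_from_match_id (match_id : Int) : Int :=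
  pvALoop match_id 0 pvMatchesPerYear

-- ===== PORT B =====
def pvYears : List Int :=
  [2008, 2009, 2010, 2011, 2012, 2013, 2014, 2015,
   2016, 2017, 2018, 2019, 2020, 2021, 2022, 2023]

def pvCounts : List Int := [50, 57, 60, 74, 76, 76, 60, 59, 60, 60, 60, 60, 60, 70, 74, 74]

-- the module-level prefix-sum loop of Source B (running total _t, appended list _CUM)
def pvCum : List Int :=
  (pvCounts.foldl (fun (acc : List Int × Int) c => (acc.1 ++ [acc.2 + c], acc.2 + c)) ([], 0)).1

-- Source B's _bisect_left: binary search; a[mid] is always in range (lo ≤ mid < hi ≤ a.length),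
-- so List.getD is exact for Python's a[mid] here.
def pvBisectLeft (a : List Int) (x : Int) (lo hi : Nat) : Nat :=
  if _h : lo < hi then
    let mid := (lo + hi) / 2
    if a.getD mid 0 < x then pvBisectLeft a x (mid + 1) hi else pvBisectLeft a x lo mid
  else lo
termination_by hi - lo
decreasing_by all_goals omega

def extract_year_from_match_id_alt (match_id : Int) : Int :=
  let i := pvBisectLeft pvCum match_id 0 pvCum.length
  if i < pvYears.length then pvYears.getD i 0 else 2023

-- ===== PRECONDITION & SPEC =====
def Spec_extract_year_from_match_id (match_id : Int) (out : Int) : Prop := out = extract_year_from_match_id_alt match_id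
instance (match_id : Int) (out : Int) : Decidable (Spec_extract_year_from_match_id match_id out) := by unfold Spec_extract_year_from_match_id; infer_instance

-- ===== CLAIM (what is proved, stated in full; the proofs are below) =====
def Claim_equal_extract_year_from_match_id : Prop := ∀ (match_id : Int), Dom_extract_year_from_match_id match_id → Spec_extract_year_from_match_id match_id (extract_year_from_match_id match_id)

-- ===== LEMMAS AND PROOFS =====

-- ===== VERDICT (by name: the statement is the Claim_ definition above) =====
-- the prefix-sum table, evaluated (used to unfold the binary search symbolically)
theorem pvCum_eq : pvCum = [50, 107, 167, 241, 317, 393, 453, 512, 572, 632, 692, 752, 812, 882, 956, 1030] := by decide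

theorem extract_year_from_match_id_spec : Claim_equal_extract_year_from_match_id := by
  intro m _
  unfold Spec_extract_year_from_match_id extract_year_from_match_id extract_year_from_match_id_alt
  simp only [pvCum_eq, pvMatchesPerYear]
  by_cases h0 : m ≤ (50:Int)
  · -- interval 0
    have hb0 : ¬ (50:Int) < m := by omega
    have hb1 : ¬ (107:Int) < m := by omega
    have hb2 : ¬ (167:Int) < m := by omega
    have hb3 : ¬ (241:Int) < m := by omega
    have hb4 : ¬ (317:Int) < m := by omega
    have hb5 : ¬ (393:Int) < m := by omega
    have hb6 : ¬ (453:Int) < m := by omega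
    have hb7 : ¬ (512:Int) < m := by omega
    have hb8 : ¬ (572:Int) < m := by omega
    have hb9 : ¬ (632:Int) < m := by omega
    have hb10 : ¬ (692:Int) < m := by omega
    have hb11 : ¬ (752:Int) < m := by omega
    have hb12 : ¬ (812:Int) < m := by omega
    have hb13 : ¬ (882:Int) < m := by omega
    have hb14 : ¬ (956:Int) < m := by omega
    have hb15 : ¬ (1030:Int) < m := by omega
    simp [pvALoop, pvBisectLeft, pvYears, *]
  by_cases h1 : m ≤ (107:Int)
  · -- interval 1
    have hb0 : (50:Int) < m := by omega
    have hb1 : ¬ (107:Int) < m := by omega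
    have hb2 : ¬ (167:Int) < m := by omega
    have hb3 : ¬ (241:Int) < m := by omega
    have hb4 : ¬ (317:Int) < m := by omega
    have hb5 : ¬ (393:Int) < m := by omega
    have hb6 : ¬ (453:Int) < m := by omega
    have hb7 : ¬ (512:Int) < m := by omega
    have hb8 : ¬ (572:Int) < m := by omega
    have hb9 : ¬ (632:Int) < m := by omega
    have hb10 : ¬ (692:Int) < m := by omega
    have hb11 : ¬ (752:Int) < m := by omega
    have hb12 : ¬ (812:Int) < m := by omega
    have hb13 : ¬ (882:Int) < m := by omega
    have hb14 : ¬ (956:Int) < m := by omega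
    have hb15 : ¬ (1030:Int) < m := by omega
    simp [pvALoop, pvBisectLeft, pvYears, *]
  by_cases h2 : m ≤ (167:Int)
  · -- interval 2
    have hb0 : (50:Int) < m := by omega
    have hb1 : (107:Int) < m := by omega
    have hb2 : ¬ (167:Int) < m := by omega
    have hb3 : ¬ (241:Int) < m := by omega
    have hb4 : ¬ (317:Int) < m := by omega
    have hb5 : ¬ (393:Int) < m := by omega
    have hb6 : ¬ (453:Int) < m := by omega
    have hb7 : ¬ (512:Int) < m := by omega
    have hb8 : ¬ (572:Int) < m := by omega
    have hb9 : ¬ (632:Int) < m := by omega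
    have hb10 : ¬ (692:Int) < m := by omega
    have hb11 : ¬ (752:Int) < m := by omega
    have hb12 : ¬ (812:Int) < m := by omega
    have hb13 : ¬ (882:Int) < m := by omega
    have hb14 : ¬ (956:Int) < m := by omega
    have hb15 : ¬ (1030:Int) < m := by omega
    simp [pvALoop, pvBisectLeft, pvYears, *]
  by_cases h3 : m ≤ (241:Int)
  · -- interval 3
    have hb0 : (50:Int) < m := by omega
    have hb1 : (107:Int) < m := by omega
    have hb2 : (167:Int) < m := by omega
    have hb3 : ¬ (241:Int) < m := by omega
    have hb4 : ¬ (317:Int) < m := by omega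
    have hb5 : ¬ (393:Int) < m := by omega
    have hb6 : ¬ (453:Int) < m := by omega
    have hb7 : ¬ (512:Int) < m := by omega
    have hb8 : ¬ (572:Int) < m := by omega
    have hb9 : ¬ (632:Int) < m := by omega
    have hb10 : ¬ (692:Int) < m := by omega
    have hb11 : ¬ (752:Int) < m := by omega
    have hb12 : ¬ (812:Int) < m := by omega
    have hb13 : ¬ (882:Int) < m := by omega
    have hb14 : ¬ (956:Int) < m := by omega
    have hb15 : ¬ (1030:Int) < m := by omega
    simp [pvALoop, pvBisectLeft, pvYears, *]
  by_cases h4 : m ≤ (317:Int)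
  · -- interval 4
    have hb0 : (50:Int) < m := by omega
    have hb1 : (107:Int) < m := by omega
    have hb2 : (167:Int) < m := by omega
    have hb3 : (241:Int) < m := by omega
    have hb4 : ¬ (317:Int) < m := by omega
    have hb5 : ¬ (393:Int) < m := by omega
    have hb6 : ¬ (453:Int) < m := by omega
    have hb7 : ¬ (512:Int) < m := by omega
    have hb8 : ¬ (572:Int) < m := by omega
    have hb9 : ¬ (632:Int) < m := by omega
    have hb10 : ¬ (692:Int) < m := by omega
    have hb11 : ¬ (752:Int) < m := by omega
    have hb12 : ¬ (812:Int) < m := by omega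
    have hb13 : ¬ (882:Int) < m := by omega
    have hb14 : ¬ (956:Int) < m := by omega
    have hb15 : ¬ (1030:Int) < m := by omega
    simp [pvALoop, pvBisectLeft, pvYears, *]
  by_cases h5 : m ≤ (393:Int)
  · -- interval 5
    have hb0 : (50:Int) < m := by omega
    have hb1 : (107:Int) < m := by omega
    have hb2 : (167:Int) < m := by omega
    have hb3 : (241:Int) < m := by omega
    have hb4 : (317:Int) < m := by omega
    have hb5 : ¬ (393:Int) < m := by omega
    have hb6 : ¬ (453:Int) < m := by omega
    have hb7 : ¬ (512:Int) < m := by omega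
    have hb8 : ¬ (572:Int) < m := by omega
    have hb9 : ¬ (632:Int) < m := by omega
    have hb10 : ¬ (692:Int) < m := by omega
    have hb11 : ¬ (752:Int) < m := by omega
    have hb12 : ¬ (812:Int) < m := by omega
    have hb13 : ¬ (882:Int) < m := by omega
    have hb14 : ¬ (956:Int) < m := by omega
    have hb15 : ¬ (1030:Int) < m := by omega
    simp [pvALoop, pvBisectLeft, pvYears, *]
  by_cases h6 : m ≤ (453:Int)
  · -- interval 6
    have hb0 : (50:Int) < m := by omega
    have hb1 : (107:Int) < m := by omega
    have hb2 : (167:Int) < m := by omega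
    have hb3 : (241:Int) < m := by omega
    have hb4 : (317:Int) < m := by omega
    have hb5 : (393:Int) < m := by omega
    have hb6 : ¬ (453:Int) < m := by omega
    have hb7 : ¬ (512:Int) < m := by omega
    have hb8 : ¬ (572:Int) < m := by omega
    have hb9 : ¬ (632:Int) < m := by omega
    have hb10 : ¬ (692:Int) < m := by omega
    have hb11 : ¬ (752:Int) < m := by omega
    have hb12 : ¬ (812:Int) < m := by omega
    have hb13 : ¬ (882:Int) < m := by omega
    have hb14 : ¬ (956:Int) < m := by omega
    have hb15 : ¬ (1030:Int) < m := by omega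
    simp [pvALoop, pvBisectLeft, pvYears, *]
  by_cases h7 : m ≤ (512:Int)
  · -- interval 7
    have hb0 : (50:Int) < m := by omega
    have hb1 : (107:Int) < m := by omega
    have hb2 : (167:Int) < m := by omega
    have hb3 : (241:Int) < m := by omega
    have hb4 : (317:Int) < m := by omega
    have hb5 : (393:Int) < m := by omega
    have hb6 : (453:Int) < m := by omega
    have hb7 : ¬ (512:Int) < m := by omega
    have hb8 : ¬ (572:Int) < m := by omega
    have hb9 : ¬ (632:Int) < m := by omega
    have hb10 : ¬ (692:Int) < m := by omega
    have hb11 : ¬ (752:Int) < m := by omega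
    have hb12 : ¬ (812:Int) < m := by omega
    have hb13 : ¬ (882:Int) < m := by omega
    have hb14 : ¬ (956:Int) < m := by omega
    have hb15 : ¬ (1030:Int) < m := by omega
    simp [pvALoop, pvBisectLeft, pvYears, *]
  by_cases h8 : m ≤ (572:Int)
  · -- interval 8
    have hb0 : (50:Int) < m := by omega
    have hb1 : (107:Int) < m := by omega
    have hb2 : (167:Int) < m := by omega
    have hb3 : (241:Int) < m := by omega
    have hb4 : (317:Int) < m := by omega
    have hb5 : (393:Int) < m := by omega
    have hb6 : (453:Int) < m := by omega
    have hb7 : (512:Int) < m := by omega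
    have hb8 : ¬ (572:Int) < m := by omega
    have hb9 : ¬ (632:Int) < m := by omega
    have hb10 : ¬ (692:Int) < m := by omega
    have hb11 : ¬ (752:Int) < m := by omega
    have hb12 : ¬ (812:Int) < m := by omega
    have hb13 : ¬ (882:Int) < m := by omega
    have hb14 : ¬ (956:Int) < m := by omega
    have hb15 : ¬ (1030:Int) < m := by omega
    simp [pvALoop, pvBisectLeft, pvYears, *]
  by_cases h9 : m ≤ (632:Int)
  · -- interval 9
    have hb0 : (50:Int) < m := by omega
    have hb1 : (107:Int) < m := by omega
    have hb2 : (167:Int) < m := by omega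
    have hb3 : (241:Int) < m := by omega
    have hb4 : (317:Int) < m := by omega
    have hb5 : (393:Int) < m := by omega
    have hb6 : (453:Int) < m := by omega
    have hb7 : (512:Int) < m := by omega
    have hb8 : (572:Int) < m := by omega
    have hb9 : ¬ (632:Int) < m := by omega
    have hb10 : ¬ (692:Int) < m := by omega
    have hb11 : ¬ (752:Int) < m := by omega
    have hb12 : ¬ (812:Int) < m := by omega
    have hb13 : ¬ (882:Int) < m := by omega
    have hb14 : ¬ (956:Int) < m := by omega
    have hb15 : ¬ (1030:Int) < m := by omega
    simp [pvALoop, pvBisectLeft, pvYears, *]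
  by_cases h10 : m ≤ (692:Int)
  · -- interval 10
    have hb0 : (50:Int) < m := by omega
    have hb1 : (107:Int) < m := by omega
    have hb2 : (167:Int) < m := by omega
    have hb3 : (241:Int) < m := by omega
    have hb4 : (317:Int) < m := by omega
    have hb5 : (393:Int) < m := by omega
    have hb6 : (453:Int) < m := by omega
    have hb7 : (512:Int) < m := by omega
    have hb8 : (572:Int) < m := by omega
    have hb9 : (632:Int) < m := by omega
    have hb10 : ¬ (692:Int) < m := by omega
    have hb11 : ¬ (752:Int) < m := by omega
    have hb12 : ¬ (812:Int) < m := by omega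
    have hb13 : ¬ (882:Int) < m := by omega
    have hb14 : ¬ (956:Int) < m := by omega
    have hb15 : ¬ (1030:Int) < m := by omega
    simp [pvALoop, pvBisectLeft, pvYears, *]
  by_cases h11 : m ≤ (752:Int)
  · -- interval 11
    have hb0 : (50:Int) < m := by omega
    have hb1 : (107:Int) < m := by omega
    have hb2 : (167:Int) < m := by omega
    have hb3 : (241:Int) < m := by omega
    have hb4 : (317:Int) < m := by omega
    have hb5 : (393:Int) < m := by omega
    have hb6 : (453:Int) < m := by omega
    have hb7 : (512:Int) < m := by omega
    have hb8 : (572:Int) < m := by omega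
    have hb9 : (632:Int) < m := by omega
    have hb10 : (692:Int) < m := by omega
    have hb11 : ¬ (752:Int) < m := by omega
    have hb12 : ¬ (812:Int) < m := by omega
    have hb13 : ¬ (882:Int) < m := by omega
    have hb14 : ¬ (956:Int) < m := by omega
    have hb15 : ¬ (1030:Int) < m := by omega
    simp [pvALoop, pvBisectLeft, pvYears, *]
  by_cases h12 : m ≤ (812:Int)
  · -- interval 12
    have hb0 : (50:Int) < m := by omega
    have hb1 : (107:Int) < m := by omega
    have hb2 : (167:Int) < m := by omega
    have hb3 : (241:Int) < m := by omega
    have hb4 : (317:Int) < m := by omega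
    have hb5 : (393:Int) < m := by omega
    have hb6 : (453:Int) < m := by omega
    have hb7 : (512:Int) < m := by omega
    have hb8 : (572:Int) < m := by omega
    have hb9 : (632:Int) < m := by omega
    have hb10 : (692:Int) < m := by omega
    have hb11 : (752:Int) < m := by omega
    have hb12 : ¬ (812:Int) < m := by omega
    have hb13 : ¬ (882:Int) < m := by omega
    have hb14 : ¬ (956:Int) < m := by omega
    have hb15 : ¬ (1030:Int) < m := by omega
    simp [pvALoop, pvBisectLeft, pvYears, *]
  by_cases h13 : m ≤ (882:Int)
  · -- interval 13
    have hb0 : (50:Int) < m := by omega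
    have hb1 : (107:Int) < m := by omega
    have hb2 : (167:Int) < m := by omega
    have hb3 : (241:Int) < m := by omega
    have hb4 : (317:Int) < m := by omega
    have hb5 : (393:Int) < m := by omega
    have hb6 : (453:Int) < m := by omega
    have hb7 : (512:Int) < m := by omega
    have hb8 : (572:Int) < m := by omega
    have hb9 : (632:Int) < m := by omega
    have hb10 : (692:Int) < m := by omega
    have hb11 : (752:Int) < m := by omega
    have hb12 : (812:Int) < m := by omega
    have hb13 : ¬ (882:Int) < m := by omega
    have hb14 : ¬ (956:Int) < m := by omega
    have hb15 : ¬ (1030:Int) < m := by omega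
    simp [pvALoop, pvBisectLeft, pvYears, *]
  by_cases h14 : m ≤ (956:Int)
  · -- interval 14
    have hb0 : (50:Int) < m := by omega
    have hb1 : (107:Int) < m := by omega
    have hb2 : (167:Int) < m := by omega
    have hb3 : (241:Int) < m := by omega
    have hb4 : (317:Int) < m := by omega
    have hb5 : (393:Int) < m := by omega
    have hb6 : (453:Int) < m := by omega
    have hb7 : (512:Int) < m := by omega
    have hb8 : (572:Int) < m := by omega
    have hb9 : (632:Int) < m := by omega
    have hb10 : (692:Int) < m := by omega
    have hb11 : (752:Int) < m := by omega
    have hb12 : (812:Int) < m := by omega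
    have hb13 : (882:Int) < m := by omega
    have hb14 : ¬ (956:Int) < m := by omega
    have hb15 : ¬ (1030:Int) < m := by omega
    simp [pvALoop, pvBisectLeft, pvYears, *]
  by_cases h15 : m ≤ (1030:Int)
  · -- interval 15
    have hb0 : (50:Int) < m := by omega
    have hb1 : (107:Int) < m := by omega
    have hb2 : (167:Int) < m := by omega
    have hb3 : (241:Int) < m := by omega
    have hb4 : (317:Int) < m := by omega
    have hb5 : (393:Int) < m := by omega
    have hb6 : (453:Int) < m := by omega
    have hb7 : (512:Int) < m := by omega
    have hb8 : (572:Int) < m := by omega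
    have hb9 : (632:Int) < m := by omega
    have hb10 : (692:Int) < m := by omega
    have hb11 : (752:Int) < m := by omega
    have hb12 : (812:Int) < m := by omega
    have hb13 : (882:Int) < m := by omega
    have hb14 : (956:Int) < m := by omega
    have hb15 : ¬ (1030:Int) < m := by omega
    simp [pvALoop, pvBisectLeft, pvYears, *]
  -- m > 1030
  have hb0 : (50:Int) < m := by omega
  have hb1 : (107:Int) < m := by omega
  have hb2 : (167:Int) < m := by omega
  have hb3 : (241:Int) < m := by omega
  have hb4 : (317:Int) < m := by omega
  have hb5 : (393:Int) < m := by omega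
  have hb6 : (453:Int) < m := by omega
  have hb7 : (512:Int) < m := by omega
  have hb8 : (572:Int) < m := by omega
  have hb9 : (632:Int) < m := by omega
  have hb10 : (692:Int) < m := by omega
  have hb11 : (752:Int) < m := by omega
  have hb12 : (812:Int) < m := by omega
  have hb13 : (882:Int) < m := by omega
  have hb14 : (956:Int) < m := by omega
  have hb15 : (1030:Int) < m := by omega
  simp [pvALoop, pvBisectLeft, pvYears, *]
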